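-- pv_equiv track=rewrite | github.com/pypi-data/pypi-mirror-403 | packages/cubexpress/cubexpress-0.1.36.tar.gz/cubexpress-0.1.36/cubexpress/download/tiling.py | _make_grid_tiles
-- ===== SOURCE A (Python) =====
-- import math
--
-- def _make_grid_tiles(width: int, height: int, max_pixels: int) -> list[tuple[int, int, int, int]]:
--     """Create 2D grid when strips don't work."""
--     # Find largest square-ish tile that fits
--     tile_size = int(math.sqrt(max_pixels))
--
--     tiles = []
--     y = 0
--     while y < height:
--         x = 0
--         h = min(tile_size, height - y)
--         while x < width:
--             w = min(tile_size, width - x)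
--             tiles.append((x, y, w, h))
--             x += w
--         y += h
--
--     return tiles
-- ===== SOURCE B (Python) =====
-- import math
--
-- def _make_grid_tiles(width: int, height: int, max_pixels: int) -> list[tuple[int, int, int, int]]:
--     """Closed-form tiling: compute the tile counts per axis by ceiling division
--     and derive each tile directly from its flat index with divmod."""
--     t = int(math.sqrt(max_pixels))
--     if t <= 0 or width <= 0 or height <= 0:
--         return []
--     nx = -(-width // t)   # ceil(width / t)
--     ny = -(-height // t)  # ceil(height / t)
--     tiles = []
--     for k in range(nx * ny):
--         i, j = divmod(k, nx)
--         x, y = j * t, i * t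
--         tiles.append((x, y, min(t, width - x), min(t, height - y)))
--     return tiles
-- ===== Notes on version B (the rewrite author's own statement) =====
-- stated objective: alternative
-- what changed: Replaces A's nested advancing while-loops by a closed form: ceiling-division tile counts per axis (nx, ny) and a single flat loop over range(nx*ny) that derives each tile's coordinates and clamped size directly from its index via divmod.
import Mathlib
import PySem

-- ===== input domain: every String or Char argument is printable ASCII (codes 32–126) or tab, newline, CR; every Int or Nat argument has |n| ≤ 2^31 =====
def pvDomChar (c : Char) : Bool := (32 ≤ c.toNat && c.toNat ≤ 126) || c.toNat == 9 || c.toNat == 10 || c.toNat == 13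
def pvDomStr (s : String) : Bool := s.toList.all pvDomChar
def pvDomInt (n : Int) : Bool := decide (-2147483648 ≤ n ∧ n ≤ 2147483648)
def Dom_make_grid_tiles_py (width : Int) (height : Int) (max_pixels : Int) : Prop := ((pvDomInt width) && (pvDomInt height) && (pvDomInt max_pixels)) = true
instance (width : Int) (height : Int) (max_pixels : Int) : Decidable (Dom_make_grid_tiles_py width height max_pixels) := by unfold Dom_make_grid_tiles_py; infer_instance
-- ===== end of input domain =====

-- B replaces A's nested advancing while-loops by a closed form: ceiling-division tile counts
-- per axis and one flat loop deriving each tile from its index by divmod; return value only.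
-- ===== PORT A =====
-- inner `while x < width` loop of A; fuel bounds the recursion (≥ iterations whenever tile_size ≥ 1)
def pvAInner (width tile_size y h : Int) : Nat → Int → List (Int × Int × Int × Int)
  | 0, _ => []
  | fuel + 1, x =>
    if x < width then
      let w := min tile_size (width - x)
      (x, y, w, h) :: pvAInner width tile_size y h fuel (x + w)
    else []

-- outer `while y < height` loop of A
def pvAOuter (width height tile_size : Int) : Nat → Int → List (Int × Int × Int × Int)
  | 0, _ => []
  | fuel + 1, y =>
    if y < height then
      let h := min tile_size (height - y)
      pvAInner width tile_size y h (width.toNat + 1) 0 ++ pvAOuter width height tile_size fuel (y + h)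
    else []

-- int(math.sqrt(max_pixels)) = isqrt on |max_pixels| ≤ 2^31 (doubles are exact there); ValueError for max_pixels < 0 is excluded by Pre_
def make_grid_tiles_py (width : Int) (height : Int) (max_pixels : Int) : List (Int × Int × Int × Int) :=
  pvAOuter width height (Int.ofNat (Nat.sqrt max_pixels.toNat)) (height.toNat + 1) 0

-- ===== PORT B =====
-- closed form of Source B: ceiling-division tile counts nx, ny; tile k is derived from divmod(k, nx)
def make_grid_tiles_py_alt (width : Int) (height : Int) (max_pixels : Int) : List (Int × Int × Int × Int) :=
  let t : Int := Int.ofNat (Nat.sqrt max_pixels.toNat)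
  if t ≤ 0 ∨ width ≤ 0 ∨ height ≤ 0 then []
  else
    let nx := -(PySem.Int.floordiv (-width) t)    -- -(-width // t) = ceil(width / t)
    let ny := -(PySem.Int.floordiv (-height) t)
    (PySem.List.pyRange 0 (nx * ny) 1).map (fun k =>
      let i := PySem.Int.floordiv k nx
      let j := PySem.Int.mod k nx
      let x := j * t
      let y := i * t
      (x, y, min t (width - x), min t (height - y)))

-- ===== PRECONDITION & SPEC =====
-- Pre_ excludes exactly the inputs where Python A does not return: max_pixels < 0 (math.sqrt raises
-- ValueError) and max_pixels = 0 with height > 0 (tile_size = 0, the outer loop never advances: divergence).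
def Pre_make_grid_tiles_py (width : Int) (height : Int) (max_pixels : Int) : Prop :=
  1 ≤ max_pixels ∨ (0 ≤ max_pixels ∧ height ≤ 0)
instance (width : Int) (height : Int) (max_pixels : Int) : Decidable (Pre_make_grid_tiles_py width height max_pixels) := by unfold Pre_make_grid_tiles_py; infer_instance
def pvWitness_make_grid_tiles_py : Int × Int × Int := (10, 7, 16)

def Spec_make_grid_tiles_py (width : Int) (height : Int) (max_pixels : Int) (out : List (Int × Int × Int × Int)) : Prop := out = make_grid_tiles_py_alt width height max_pixels
instance (width : Int) (height : Int) (max_pixels : Int) (out : List (Int × Int × Int × Int)) : Decidable (Spec_make_grid_tiles_py width height max_pixels out) := by unfold Spec_make_grid_tiles_py; infer_instance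

-- ===== CLAIM (what is proved, stated in full; the proofs are below) =====
def Claim_equal_make_grid_tiles_py : Prop := ∀ (width : Int) (height : Int) (max_pixels : Int), Dom_make_grid_tiles_py width height max_pixels → Pre_make_grid_tiles_py width height max_pixels → Spec_make_grid_tiles_py width height max_pixels (make_grid_tiles_py width height max_pixels)

-- ===== LEMMAS AND PROOFS =====
lemma pvAInner_stop (width t y h x : Int) (hx : width ≤ x) (fuel : Nat) :
    pvAInner width t y h fuel x = [] := by
  cases fuel <;> simp [pvAInner, show ¬ x < width by omega]

lemma pvAOuter_stop (width height t y : Int) (hy : height ≤ y) (fuel : Nat) :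
    pvAOuter width height t fuel y = [] := by
  cases fuel <;> simp [pvAOuter, show ¬ y < height by omega]

lemma pvAOuter_empty (width height t : Int) (hw0 : width ≤ 0) :
    ∀ (fuel : Nat) (y : Int), pvAOuter width height t fuel y = [] := by
  intro fuel
  induction fuel with
  | zero => intro y; rfl
  | succ n ih =>
    intro y
    simp only [pvAOuter]
    split
    · rw [pvAInner_stop _ _ _ _ _ (by omega : width ≤ 0), ih]; rfl
    · rfl

lemma pvAInner_closed (width t y h nx : Int) (ht : 1 ≤ t)
    (hb1 : (nx - 1) * t < width) (hb2 : width ≤ nx * t) :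
    ∀ (m fuel : Nat) (k : Int), 0 ≤ k → k + m = nx → m ≤ fuel →
      pvAInner width t y h fuel (k * t) =
        (PySem.List.pyRange k nx 1).map (fun j => (j * t, y, min t (width - j * t), h)) := by
  intro m
  induction m with
  | zero =>
    intro fuel k hk hknx _
    have hxnlt : width ≤ k * t := by
      have : k = nx := by omega
      subst this; exact hb2
    rw [pvAInner_stop _ _ _ _ _ hxnlt, PySem.List.pyRange_one_eq_nil (show nx ≤ k by omega)]
    rfl
  | succ m ih =>
    intro fuel k hk hknx hfuel
    cases fuel with
    | zero => omega
    | succ f =>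
      have hklt : k < nx := by omega
      have hxlt : k * t < width := by
        have h1 : k * t ≤ (nx - 1) * t := by
          apply mul_le_mul_of_nonneg_right (by omega) (by omega)
        omega
      rw [PySem.List.pyRange_one_cons hklt]
      simp only [pvAInner, if_pos hxlt, List.map_cons]
      congr 1
      by_cases hc : (k + 1) * t ≤ width
      · have hexp : (k + 1) * t = k * t + t := by ring
        have hmin : min t (width - k * t) = t := min_eq_left (by omega)
        rw [hmin, show k * t + t = (k + 1) * t from by ring]
        exact ih f (k + 1) (by omega) (by omega) (by omega)
      · have hexp : (k + 1) * t = k * t + t := by ring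
        have hknx1 : k + 1 = nx := by
          by_contra hne
          have h2 : (k + 1) * t ≤ (nx - 1) * t :=
            mul_le_mul_of_nonneg_right (by omega) (by omega)
          omega
        have hmin : min t (width - k * t) = width - k * t := min_eq_right (by omega)
        rw [hmin, show k * t + (width - k * t) = width from by ring,
            pvAInner_stop _ _ _ _ _ (le_refl width),
            PySem.List.pyRange_one_eq_nil (show nx ≤ k + 1 by omega)]
        rfl

lemma pvAOuter_closed (width height t nx ny : Int) (ht : 1 ≤ t) (hw : 1 ≤ width)
    (hbx1 : (nx - 1) * t < width) (hbx2 : width ≤ nx * t)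
    (hby1 : (ny - 1) * t < height) (hby2 : height ≤ ny * t) :
    ∀ (m fuel : Nat) (i : Int), 0 ≤ i → i + m = ny → m ≤ fuel →
      pvAOuter width height t fuel (i * t) =
        (PySem.List.pyRange i ny 1).flatMap (fun i' =>
          (PySem.List.pyRange 0 nx 1).map (fun j =>
            (j * t, i' * t, min t (width - j * t), min t (height - i' * t)))) := by
  have hnx1 : 1 ≤ nx := by nlinarith
  have hnxw : nx ≤ width := by nlinarith
  intro m
  induction m with
  | zero =>
    intro fuel i hi hiny _
    have : height ≤ i * t := by
      have : i = ny := by omega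
      subst this; exact hby2
    rw [pvAOuter_stop _ _ _ _ this, PySem.List.pyRange_one_eq_nil (show ny ≤ i by omega)]
    rfl
  | succ m ih =>
    intro fuel i hi hiny hfuel
    cases fuel with
    | zero => omega
    | succ f =>
      have hilt : i < ny := by omega
      have hylt : i * t < height := by
        have h1 : i * t ≤ (ny - 1) * t :=
          mul_le_mul_of_nonneg_right (by omega) (by omega)
        omega
      rw [PySem.List.pyRange_one_cons hilt, List.flatMap_cons]
      simp only [pvAOuter, if_pos hylt]
      congr 1
      · have := pvAInner_closed width t (i * t) (min t (height - i * t)) nx ht hbx1 hbx2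
          nx.toNat (width.toNat + 1) 0 (le_refl 0) (by omega) (by omega)
        simpa using this
      · by_cases hc : (i + 1) * t ≤ height
        · have hexp : (i + 1) * t = i * t + t := by ring
          have hmin : min t (height - i * t) = t := min_eq_left (by omega)
          rw [hmin, show i * t + t = (i + 1) * t from by ring]
          exact ih f (i + 1) (by omega) (by omega) (by omega)
        · have hexp : (i + 1) * t = i * t + t := by ring
          have hiny1 : i + 1 = ny := by
            by_contra hne
            have h2 : (i + 1) * t ≤ (ny - 1) * t :=
              mul_le_mul_of_nonneg_right (by omega) (by omega)
            omega
          have hmin : min t (height - i * t) = height - i * t := min_eq_right (by omega)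
          rw [hmin, show i * t + (height - i * t) = height from by ring,
              pvAOuter_stop _ _ _ _ (le_refl height),
              PySem.List.pyRange_one_eq_nil (show ny ≤ i + 1 by omega)]
          rfl

-- a flat range of nx*n indices mapped through g is the nested double range
lemma pvFlatProduct {α : Type} (g : Int → α) (nx : Int) (hnx : 0 < nx) :
    ∀ (n : Nat), (PySem.List.pyRange 0 (nx * n) 1).map g =
      (PySem.List.pyRange 0 (n : Int) 1).flatMap (fun i =>
        (PySem.List.pyRange 0 nx 1).map (fun j => g (i * nx + j))) := by
  intro n
  induction n with
  | zero => simp [PySem.List.pyRange_one_eq_nil]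
  | succ n ih =>
    have hsplit : PySem.List.pyRange 0 (nx * (n + 1 : Nat)) 1 =
        PySem.List.pyRange 0 (nx * n) 1 ++ PySem.List.pyRange (nx * n) (nx * (n + 1 : Nat)) 1 := by
      apply PySem.List.pyRange_one_append <;> push_cast <;> nlinarith
    have hsucc : ((n + 1 : Nat) : Int) = (n : Int) + 1 := by push_cast; ring
    rw [hsplit, List.map_append, hsucc,
        PySem.List.pyRange_one_succ_right (by positivity), List.flatMap_append, ih]
    congr 1
    simp only [List.flatMap_cons, List.flatMap_nil, List.append_nil]
    rw [PySem.List.pyRange_one, PySem.List.pyRange_one, List.map_map, List.map_map]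
    have hlen : (nx * ((n : Int) + 1) - nx * n).toNat = (nx - 0).toNat := by
      have : nx * ((n : Int) + 1) - nx * n = nx := by ring
      rw [this]; omega
    rw [hlen]
    apply List.map_congr_left
    intro a _ha
    simp only [Function.comp]
    congr 1
    ring

lemma pvDivMod (nx i j : Int) (hnx : 0 < nx) (hi : 0 ≤ i) (hj1 : 0 ≤ j) (hj2 : j < nx) :
    PySem.Int.floordiv (i * nx + j) nx = i ∧ PySem.Int.mod (i * nx + j) nx = j := by
  rw [PySem.Int.floordiv_eq_ediv_of_pos hnx, PySem.Int.mod_eq_emod_of_pos hnx]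
  constructor
  · rw [add_comm, Int.add_mul_ediv_right _ _ (by omega : nx ≠ 0),
        Int.ediv_eq_zero_of_lt hj1 hj2]
    ring
  · rw [add_comm, Int.add_mul_emod_self_right, Int.emod_eq_of_lt hj1 hj2]

lemma pvFlatMapCongr {α β : Type} {l : List α} {f g : α → List β}
    (h : ∀ a ∈ l, f a = g a) : l.flatMap f = l.flatMap g := by
  simp only [List.flatMap_def]
  rw [List.map_congr_left h]

-- ===== VERDICT (by name: the statement is the Claim_ definition above) =====
theorem make_grid_tiles_py_spec : Claim_equal_make_grid_tiles_py := by
  intro width height max_pixels _ hpre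
  unfold Spec_make_grid_tiles_py make_grid_tiles_py make_grid_tiles_py_alt
  set t : Int := Int.ofNat (Nat.sqrt max_pixels.toNat) with ht_def
  have ht0 : 0 ≤ t := Int.natCast_nonneg _
  by_cases hcond : t ≤ 0 ∨ width ≤ 0 ∨ height ≤ 0
  · rw [if_pos hcond]
    by_cases hh : height ≤ 0
    · exact pvAOuter_stop _ _ _ _ (by omega) _
    · -- height > 0; then Pre_ forces max_pixels ≥ 1, hence t ≥ 1, so width ≤ 0
      have hm1 : 1 ≤ max_pixels := by
        cases hpre with
        | inl h => exact h
        | inr h => omega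
      have ht1 : 1 ≤ t := by
        have hs : 0 < Nat.sqrt max_pixels.toNat := Nat.sqrt_pos.mpr (by omega)
        rw [ht_def, Int.ofNat_eq_natCast]; exact_mod_cast hs
      have hw : width ≤ 0 := by omega
      exact pvAOuter_empty _ _ _ hw _ _
  · rw [if_neg hcond]
    push_neg at hcond
    obtain ⟨ht1', hw1', hh1'⟩ := hcond
    have ht1 : 1 ≤ t := by omega
    have hw1 : 1 ≤ width := by omega
    have hh1 : 1 ≤ height := by omega
    set nx : Int := -(PySem.Int.floordiv (-width) t) with hnx_def
    set ny : Int := -(PySem.Int.floordiv (-height) t) with hny_def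
    have hbx := (PySem.Int.neg_floordiv_neg_eq_iff_of_pos (a := width) (b := t) (q := nx)
      (by omega)).mp hnx_def.symm
    have hby := (PySem.Int.neg_floordiv_neg_eq_iff_of_pos (a := height) (b := t) (q := ny)
      (by omega)).mp hny_def.symm
    have hnx1 : 1 ≤ nx := by nlinarith [hbx.2]
    have hny1 : 1 ≤ ny := by nlinarith [hby.2]
    have hnyh : ny ≤ height := by nlinarith [hby.1]
    -- A side: closed form of the two while loops
    have hA := pvAOuter_closed width height t nx ny ht1 hw1 hbx.1 hbx.2 hby.1 hby.2
      ny.toNat (height.toNat + 1) 0 (le_refl 0) (by omega) (by omega)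
    simp only [zero_mul] at hA
    rw [hA]
    -- B side: flat range = nested ranges
    have hcast : (ny.toNat : Int) = ny := by omega
    have hB := pvFlatProduct (fun k =>
        (PySem.Int.mod k nx * t, PySem.Int.floordiv k nx * t,
         min t (width - PySem.Int.mod k nx * t),
         min t (height - PySem.Int.floordiv k nx * t))) nx (by omega) ny.toNat
    rw [hcast] at hB
    rw [hB]
    apply pvFlatMapCongr
    intro i hi
    have hi' := (PySem.List.mem_pyRange_one).mp hi
    apply List.map_congr_left
    intro j hj
    have hj' := (PySem.List.mem_pyRange_one).mp hj
    obtain ⟨hdv, hmd⟩ := pvDivMod nx i j (by omega) hi'.1 hj'.1 hj'.2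
    simp only [hdv, hmd]
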